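-- pv_equiv track=rewrite | github.com/crag0697/Python-Data-Structures | setssolution.py | unique_word_composition
-- ===== SOURCE A (Python) =====
-- def unique_word_composition(strings):
-- 	# Create a set to hold the unique words
-- 	unique_words = set()
--
--     # Iterate through the words in the list and initialize the set to hold the letters
-- 	for word in strings:
-- 		word_letters = set()
--
--         # Add each letter to the set which will then only hold duplicates
-- 		for letter in word:
-- 			word_letters.add(letter)
--
--         # Compare the new set with the original string. If there are the same number
--         # of letters in each then we know that the string is made of only unique elements
-- 		if len(word_letters) == len(word):
-- 			unique_words.add(word)
--
-- 	return unique_words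
-- ===== SOURCE B (Python) =====
-- def unique_word_composition(strings):
--     unique_words = set()
--     for word in strings:
--         s = sorted(word)
--         if all(a != b for a, b in zip(s, s[1:])):
--             unique_words.add(word)
--     return unique_words
-- ===== Notes on version B (the rewrite author's own statement) =====
-- stated objective: alternative
-- what changed: Each word's letter-distinctness is decided by sorting its characters and scanning for equal adjacent pairs, instead of building a letter set and comparing its size to the word's length.
import Mathlib
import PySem

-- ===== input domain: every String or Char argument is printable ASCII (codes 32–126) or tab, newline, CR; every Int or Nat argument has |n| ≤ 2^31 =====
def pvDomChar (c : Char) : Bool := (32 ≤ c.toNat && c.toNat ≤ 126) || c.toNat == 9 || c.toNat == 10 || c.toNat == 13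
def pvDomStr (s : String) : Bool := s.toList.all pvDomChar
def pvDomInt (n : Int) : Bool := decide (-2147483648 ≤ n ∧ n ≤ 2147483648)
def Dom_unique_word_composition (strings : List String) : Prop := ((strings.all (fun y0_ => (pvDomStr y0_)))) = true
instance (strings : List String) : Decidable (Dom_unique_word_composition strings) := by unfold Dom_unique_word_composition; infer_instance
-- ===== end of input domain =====

-- B tests each word's letter-distinctness by sorting its characters and scanning adjacent pairs,
-- instead of A's letter-set-size comparison (alternative decomposition, similar cost).


-- ===== PORT A =====
def unique_word_composition (strings : List String) : List String :=
  strings.foldl (fun unique_words word =>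
    let word_letters := word.toList.foldl (fun s letter => PySem.Set.add s letter) PySem.Set.empty
    if PySem.Set.len word_letters = PySem.Str.len word then PySem.Set.add unique_words word
    else unique_words) PySem.Set.empty

-- ===== PORT B =====
def unique_word_composition_alt (strings : List String) : List String :=
  strings.foldl (fun unique_words word =>
    let s := PySem.List.sorted word.toList (fun x => x) false
    if (s.zip s.tail).all (fun p => p.1 != p.2) then PySem.Set.add unique_words word
    else unique_words) PySem.Set.empty

-- ===== PRECONDITION & SPEC =====
def Spec_unique_word_composition (strings : List String) (out : List String) : Prop := out = unique_word_composition_alt strings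
instance (strings : List String) (out : List String) : Decidable (Spec_unique_word_composition strings out) := by unfold Spec_unique_word_composition; infer_instance

-- ===== CLAIM (what is proved, stated in full; the proofs are below) =====
def Claim_equal_unique_word_composition : Prop := ∀ (strings : List String), Dom_unique_word_composition strings → Spec_unique_word_composition strings (unique_word_composition strings)

-- ===== LEMMAS AND PROOFS =====

-- A's test: the letter set has as many elements as the word iff the letters are distinct
lemma ofList_length_iff (l : List Char) :
    (PySem.Set.ofList l).length = l.length ↔ l.Nodup := by
  have hcard : (PySem.Set.ofList l).toFinset = l.toFinset := by
    ext x; simp [List.mem_toFinset, PySem.Set.mem_ofList]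
  constructor
  · intro h
    have h1 : l.toFinset.card = l.length := by
      rw [← hcard, List.toFinset_card_of_nodup (PySem.Set.nodup_ofList l), h]
    have h2 : l.dedup = l :=
      (List.dedup_sublist l).eq_of_length (by rw [← List.card_toFinset, h1])
    rw [← h2]; exact List.nodup_dedup l
  · intro h
    rw [← List.toFinset_card_of_nodup (PySem.Set.nodup_ofList l), hcard,
      List.toFinset_card_of_nodup h]

lemma lenA_iff (l : List Char) :
    (PySem.Set.len (l.foldl (fun s letter => PySem.Set.add s letter) PySem.Set.empty)
      = (l.length : Int)) ↔ l.Nodup := by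
  have h : l.foldl (fun s letter => PySem.Set.add s letter) PySem.Set.empty
      = PySem.Set.ofList l := (PySem.Set.ofList_eq_foldl l).symm
  rw [h, PySem.Set.len, ← ofList_length_iff l]
  exact_mod_cast Iff.rfl

-- B's adjacent-pair scan is IsChain (. ≠ .)
lemma zip_all_ne_iff_chain' (s : List Char) :
    ((s.zip s.tail).all (fun p => p.1 != p.2) = true) ↔ s.IsChain (· ≠ ·) := by
  induction s with
  | nil => simp
  | cons a t ih =>
    cases t with
    | nil => simp
    | cons b t' =>
      simp only [List.tail_cons, List.zip_cons_cons, List.all_cons, Bool.and_eq_true,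
        List.isChain_cons_cons, bne_iff_ne, ne_eq] at *
      rw [ih]

-- on a weakly sorted list, no equal adjacent pair iff no duplicates
lemma ischain_ne_iff_nodup (s : List Char) (hp : s.Pairwise (· ≤ ·)) :
    s.IsChain (· ≠ ·) ↔ s.Nodup := by
  induction s with
  | nil => simp
  | cons a t ih =>
    rcases List.pairwise_cons.mp hp with ⟨ha, ht⟩
    cases t with
    | nil => simp
    | cons b t' =>
      have hb : ∀ x ∈ t', b ≤ x := fun x hx => (List.pairwise_cons.mp ht).1 x hx
      rw [List.isChain_cons_cons, ih ht]
      constructor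
      · rintro ⟨hab, hnd⟩
        refine List.nodup_cons.mpr ⟨?_, hnd⟩
        intro hm
        rcases List.mem_cons.mp hm with h | h
        · exact hab h
        · exact hab (le_antisymm (ha b (List.mem_cons_self)) (hb a h) ▸ rfl)
      · intro h
        rcases List.nodup_cons.mp h with ⟨hm, hnd⟩
        exact ⟨fun h => hm (h ▸ List.mem_cons_self), hnd⟩

lemma adjB_iff (l : List Char) :
    (((PySem.List.sorted l (fun x => x) false).zip
        (PySem.List.sorted l (fun x => x) false).tail).all
        (fun p => p.1 != p.2) = true) ↔ l.Nodup := by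
  rw [zip_all_ne_iff_chain',
    ischain_ne_iff_nodup _ (PySem.List.sorted_pairwise l (fun x => x)),
    (PySem.List.sorted_perm l (fun x => x) false).nodup_iff]

-- ===== VERDICT (by name: the statement is the Claim_ definition above) =====
theorem unique_word_composition_spec : Claim_equal_unique_word_composition := by
  intro strings _
  unfold Spec_unique_word_composition unique_word_composition unique_word_composition_alt
  congr 1
  funext unique_words word
  simp only []
  have h : ((List.foldl (fun s letter => PySem.Set.add s letter) PySem.Set.empty word.toList).len
      = PySem.Str.len word) ↔
      (((PySem.List.sorted word.toList (fun x => x) false).zip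
          (PySem.List.sorted word.toList (fun x => x) false).tail).all
          (fun p => p.1 != p.2) = true) := by
    rw [PySem.Str.len_eq]
    exact (lenA_iff word.toList).trans (adjB_iff word.toList).symm
  exact if_congr h rfl rfl
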